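-- pv_equiv track=rewrite | github.com/RadioGnu/decomposition-images | main.py | liste_image_proche
-- ===== SOURCE A (Python) =====
-- def liste_image_proche(val_moyenne, dico_galerie):
--     """Associe à la valeur moyenne de chaque subdivision de l'image initiale
--     toutes les image dont la valeur moyenne est proche.
--
--     Parameters
--     ----------
--     val_moyenne : tuple
--         tuple contenant les 3 valeurs RGB moyenne de la subdivision et la valeur moyenne de la luminosité.
--     dico_galerie : dict
--         clé  : l'indice de l'image dans le dossier initial
--         valeur : objet image et tuple valeur moyenne en RGB.
--
--     Returns
--     -------
--     couleur_proche : list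
--         liste des images ayant une couleur moyenne proche de la subdivision
--     """
--
--     couleur_proche = []
--     #distance la plus élevée a l'image -> nécessairement des images plus proche
--     ecart_min = [256, 256, 256]
--
--     for image, val in dico_galerie.values(): #parcours du dictionnaire
--         RGB_proche = [] #initialisation de la liste des écarts
--         RGB_min = []
--
--         for couleur in range(3):
--             ecart_couleur = int(abs(val_moyenne[couleur]-val[couleur]))
--
--             #ecart choisi pour avoir une couleur suffisamment proche
--             if ecart_couleur <= 30:
--                 RGB_proche.append(ecart_couleur)
--
--             if ecart_couleur <= ecart_min[couleur]  :
--                 RGB_min.append(ecart_couleur)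
--
--
--         #il faut que les trois soit très proche
--         if len(RGB_proche)==3:
--             couleur_proche.append(image)
--
--         elif len(RGB_min)==3:
--             image_proche = image
--             ecart_min = RGB_min
--
--         #si il n'y a pas d'image proche, choisir celle la plus proche
--     if len(couleur_proche) == 0:
--         couleur_proche.append(image_proche)
--
--     return couleur_proche
-- ===== SOURCE B (Python) =====
-- def liste_image_proche(val_moyenne, dico_galerie):
--     # Pass 1: keep every image whose three channel gaps are all <= 30.
--     couleur_proche = [image for image, val in dico_galerie.values()
--                       if all(int(abs(val_moyenne[c] - val[c])) <= 30 for c in range(3))]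
--     if couleur_proche:
--         return couleur_proche
--     # Pass 2 (only when nothing was close): track the componentwise-minimal image.
--     ecart_min = [256, 256, 256]
--     for image, val in dico_galerie.values():
--         deltas = [int(abs(val_moyenne[c] - val[c])) for c in range(3)]
--         if all(deltas[c] <= ecart_min[c] for c in range(3)):
--             image_proche = image
--             ecart_min = deltas
--     return [image_proche]
-- ===== Notes on version B (the rewrite author's own statement) =====
-- stated objective: alternative
-- what changed: A's single pass interleaves the close-image filter with the running componentwise-minimum fallback in one loop with shared per-entry list building; B first filters the close images with a comprehension and only when that list is empty runs a separate minimum-tracking pass.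
import Mathlib
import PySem

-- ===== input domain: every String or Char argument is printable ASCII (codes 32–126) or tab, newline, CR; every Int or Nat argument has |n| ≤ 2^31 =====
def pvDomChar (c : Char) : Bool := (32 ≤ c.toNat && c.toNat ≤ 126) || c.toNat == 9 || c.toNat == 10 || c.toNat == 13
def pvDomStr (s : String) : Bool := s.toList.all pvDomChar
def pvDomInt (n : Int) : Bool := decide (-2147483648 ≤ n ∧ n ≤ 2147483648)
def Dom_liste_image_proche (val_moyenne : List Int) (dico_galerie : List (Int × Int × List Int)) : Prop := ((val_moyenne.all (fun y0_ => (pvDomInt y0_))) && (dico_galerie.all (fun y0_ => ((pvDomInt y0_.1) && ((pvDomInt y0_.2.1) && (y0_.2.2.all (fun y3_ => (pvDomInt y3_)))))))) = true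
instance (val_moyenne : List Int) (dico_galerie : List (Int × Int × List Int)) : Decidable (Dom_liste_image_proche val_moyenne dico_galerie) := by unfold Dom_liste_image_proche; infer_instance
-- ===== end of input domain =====

-- B splits A's single interleaved loop into a filter comprehension plus a separate
-- fallback minimum-tracking pass run only when the filter is empty; same cost, return
-- values proved equal on Pre_.

-- ===== PORT A =====
-- ecart_couleur = int(abs(val_moyenne[couleur]-val[couleur])); the getD 0 default is
-- unreachable under Pre_ (both lists have the three indexed components).
def ecartA (vm val : List Int) (c : Int) : Int :=
  |(PySem.List.pyGet? vm c).getD 0 - (PySem.List.pyGet? val c).getD 0|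

-- one iteration of A's outer loop; state = (couleur_proche, ecart_min, image_proche)
def stepA (vm : List Int) (st : List Int × List Int × Option Int)
    (e : Int × Int × List Int) : List Int × List Int × Option Int :=
  let rgb := [0, 1, 2].foldl (fun (p : List Int × List Int) c =>
      let ec := ecartA vm e.2.2 c
      (if ec ≤ 30 then p.1 ++ [ec] else p.1,
       if ec ≤ (PySem.List.pyGet? st.2.1 c).getD 0 then p.2 ++ [ec] else p.2)) ([], [])
  if rgb.1.length = 3 then (st.1 ++ [e.2.1], st.2.1, st.2.2)
  else if rgb.2.length = 3 then (st.1, rgb.2, some e.2.1)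
  else (st.1, st.2.1, st.2.2)

def liste_image_proche (val_moyenne : List Int) (dico_galerie : List (Int × Int × List Int)) : List Int :=
  let st := dico_galerie.foldl (stepA val_moyenne) ([], [256, 256, 256], none)
  if st.1.length = 0 then
    match st.2.2 with
    | some i => st.1 ++ [i]
    | none => []   -- Python raises UnboundLocalError here; excluded by Pre_
  else st.1

-- ===== PORT B =====
def deltaB (vm val : List Int) (c : Int) : Int :=
  |(PySem.List.pyGet? vm c).getD 0 - (PySem.List.pyGet? val c).getD 0|

def closeB (vm val : List Int) : Bool := [0, 1, 2].all (fun c => deltaB vm val c ≤ 30)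

-- one iteration of B's fallback pass; state = (image_proche, ecart_min)
def stepB (vm : List Int) (st : Option Int × List Int)
    (e : Int × Int × List Int) : Option Int × List Int :=
  let ds := [0, 1, 2].map (fun c => deltaB vm e.2.2 c)
  if [0, 1, 2].all (fun c =>
      (PySem.List.pyGet? ds c).getD 0 ≤ (PySem.List.pyGet? st.2 c).getD 0)
  then (some e.2.1, ds) else st

def liste_image_proche_alt (val_moyenne : List Int) (dico_galerie : List (Int × Int × List Int)) : List Int :=
  let cp := (dico_galerie.filter (fun e => closeB val_moyenne e.2.2)).map (fun e => e.2.1)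
  if cp.isEmpty then
    match (dico_galerie.foldl (stepB val_moyenne) (none, [256, 256, 256])).1 with
    | some i => [i]
    | none => []   -- Python raises UnboundLocalError here; excluded by Pre_
  else cp

-- ===== PRECONDITION & SPEC =====
-- Pre_ excludes: inputs where Python A raises (val_moyenne or some gallery value lacking
-- the three indexed components → IndexError; no gallery entry with all three gaps ≤ 256 →
-- UnboundLocalError), and gallery association lists with duplicate keys, on which the
-- Python dict collapses entries so the assoc-list representation is ambiguous.
def Pre_liste_image_proche (val_moyenne : List Int) (dico_galerie : List (Int × Int × List Int)) : Prop :=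
  3 ≤ val_moyenne.length ∧ (∀ e ∈ dico_galerie, 3 ≤ e.2.2.length) ∧
  (dico_galerie.map Prod.fst).Nodup ∧
  ∃ e ∈ dico_galerie, ∀ c ∈ ([0, 1, 2] : List Int), ecartA val_moyenne e.2.2 c ≤ 256
instance (val_moyenne : List Int) (dico_galerie : List (Int × Int × List Int)) : Decidable (Pre_liste_image_proche val_moyenne dico_galerie) := by unfold Pre_liste_image_proche; infer_instance

def pvWitness_liste_image_proche : List Int × (List (Int × Int × List Int)) :=
  ([0, 0, 0], [(1, 7, [10, 20, 30])])

def Spec_liste_image_proche (val_moyenne : List Int) (dico_galerie : List (Int × Int × List Int)) (out : List Int) : Prop := out = liste_image_proche_alt val_moyenne dico_galerie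
instance (val_moyenne : List Int) (dico_galerie : List (Int × Int × List Int)) (out : List Int) : Decidable (Spec_liste_image_proche val_moyenne dico_galerie out) := by unfold Spec_liste_image_proche; infer_instance

-- ===== CLAIM (what is proved, stated in full; the proofs are below) =====
def Claim_equal_liste_image_proche : Prop := ∀ (val_moyenne : List Int) (dico_galerie : List (Int × Int × List Int)), Dom_liste_image_proche val_moyenne dico_galerie → Pre_liste_image_proche val_moyenne dico_galerie → Spec_liste_image_proche val_moyenne dico_galerie (liste_image_proche val_moyenne dico_galerie)

-- ===== LEMMAS AND PROOFS =====

theorem stepA_eq (vm : List Int) (cp em : List Int) (ip : Option Int)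
    (e : Int × Int × List Int) :
    stepA vm (cp, em, ip) e =
      if closeB vm e.2.2 then (cp ++ [e.2.1], em, ip)
      else if [0, 1, 2].all (fun c => deltaB vm e.2.2 c ≤ (PySem.List.pyGet? em c).getD 0)
      then (cp, [0, 1, 2].map (fun c => deltaB vm e.2.2 c), some e.2.1)
      else (cp, em, ip) := by
  have hd : deltaB = ecartA := rfl
  by_cases h0 : ecartA vm e.2.2 0 ≤ 30 <;>
  by_cases h1 : ecartA vm e.2.2 1 ≤ 30 <;>
  by_cases h2 : ecartA vm e.2.2 2 ≤ 30 <;>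
  by_cases g0 : ecartA vm e.2.2 0 ≤ (PySem.List.pyGet? em 0).getD 0 <;>
  by_cases g1 : ecartA vm e.2.2 1 ≤ (PySem.List.pyGet? em 1).getD 0 <;>
  by_cases g2 : ecartA vm e.2.2 2 ≤ (PySem.List.pyGet? em 2).getD 0 <;>
  simp [stepA, closeB, hd, List.foldl_cons, List.foldl_nil, List.all_cons, List.all_nil,
    List.map_cons, List.map_nil, h0, h1, h2, g0, g1, g2]

theorem stepB_eq (vm : List Int) (ip : Option Int) (em : List Int)
    (e : Int × Int × List Int) :
    stepB vm (ip, em) e =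
      if [0, 1, 2].all (fun c => deltaB vm e.2.2 c ≤ (PySem.List.pyGet? em c).getD 0)
      then (some e.2.1, [0, 1, 2].map (fun c => deltaB vm e.2.2 c))
      else (ip, em) := by
  simp only [stepB, List.map, List.all, PySem.List.pyGet?]
  norm_num [PySem.List.pyIdx?, Int.toNat]

theorem foldA_cp (vm : List Int) (dico : List (Int × Int × List Int)) :
    ∀ (cp em : List Int) (ip : Option Int),
      (dico.foldl (stepA vm) (cp, em, ip)).1 =
        cp ++ (dico.filter (fun e => closeB vm e.2.2)).map (fun e => e.2.1) := by
  induction dico with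
  | nil => simp
  | cons e t ih =>
    intro cp em ip
    simp only [List.foldl_cons, stepA_eq]
    by_cases h : closeB vm e.2.2
    · simp [h, ih]
    · by_cases g : [0,1,2].all (fun c => deltaB vm e.2.2 c ≤ (PySem.List.pyGet? em c).getD 0) <;>
        simp [h, g, ih]

theorem foldA_min (vm : List Int) (dico : List (Int × Int × List Int))
    (hnc : ∀ e ∈ dico, closeB vm e.2.2 = false) :
    ∀ (cp em : List Int) (ip : Option Int),
      (dico.foldl (stepA vm) (cp, em, ip)).2 =
        ((dico.foldl (stepB vm) (ip, em)).2, (dico.foldl (stepB vm) (ip, em)).1) := by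
  induction dico with
  | nil => simp
  | cons e t ih =>
    intro cp em ip
    have he : closeB vm e.2.2 = false := hnc e (by simp)
    have iht := ih (fun x hx => hnc x (by simp [hx]))
    simp only [List.foldl_cons, stepA_eq, stepB_eq, he, Bool.false_eq_true, if_false]
    by_cases g : [0,1,2].all (fun c => deltaB vm e.2.2 c ≤ (PySem.List.pyGet? em c).getD 0) <;>
      simp [g, iht]

theorem ab_eq (vm : List Int) (dico : List (Int × Int × List Int)) :
    liste_image_proche vm dico = liste_image_proche_alt vm dico := by
  by_cases hc : (dico.filter (fun e => closeB vm e.2.2)) = []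
  · have hnc : ∀ e ∈ dico, closeB vm e.2.2 = false := by
      intro e he
      by_contra h
      exact (List.ne_nil_of_mem (List.mem_filter.mpr ⟨he, by simpa using h⟩)) hc
    have h1 := foldA_cp vm dico [] [256,256,256] none
    have h2 := foldA_min vm dico hnc [] [256,256,256] none
    simp only [liste_image_proche, liste_image_proche_alt, hc, List.map_nil] at *
    rw [h2]
    simp [h1]
  · have h1 := foldA_cp vm dico [] [256,256,256] none
    simp only [liste_image_proche, liste_image_proche_alt]
    rw [h1]
    simp [List.isEmpty_iff, hc]

-- ===== VERDICT (by name: the statement is the Claim_ definition above) =====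
theorem liste_image_proche_spec : Claim_equal_liste_image_proche := by
  intro vm dico _ _
  unfold Spec_liste_image_proche
  exact ab_eq vm dico
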